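-- pv_equiv track=rewrite | github.com/firaasantar/CalculatorGame | jpm.py | zero_checker
-- ===== SOURCE A (Python) =====
-- def zero_checker(number):
--     """Checks if the number starts with one or multiple zeros, and returns the number with the zeros removed.
--
--     Args:
--         number (List): List with each entry being a number 0-9.
--
--     Returns:
--         list: List with each entry being a number 0-9, and it is no longer starting with 0.
--     """
--     start = 0
--     if number == []:
--         return number
--     if(number[0] == 0):
--         for i in range(len(number)):
--             if(number[i] != 0):
--                 start = i
--                 break
--             if(i >= len(number) - 1):
--                 return [0]
--
--     return number[start:]
-- ===== SOURCE B (Python) =====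
-- def zero_checker(number):
--     """Checks if the number starts with one or multiple zeros, and returns the number with the zeros removed."""
--     if number == []:
--         return number
--     if number[0] != 0:
--         return number
--     if len(number) == 1:
--         return [0]
--     return zero_checker(number[1:])
-- ===== Notes on version B (the rewrite author's own statement) =====
-- stated objective: simpler
-- what changed: Replaced the index scan with break/early-return and the final slice by a direct structural recursion that peels one leading zero at a time.
import Mathlib
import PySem

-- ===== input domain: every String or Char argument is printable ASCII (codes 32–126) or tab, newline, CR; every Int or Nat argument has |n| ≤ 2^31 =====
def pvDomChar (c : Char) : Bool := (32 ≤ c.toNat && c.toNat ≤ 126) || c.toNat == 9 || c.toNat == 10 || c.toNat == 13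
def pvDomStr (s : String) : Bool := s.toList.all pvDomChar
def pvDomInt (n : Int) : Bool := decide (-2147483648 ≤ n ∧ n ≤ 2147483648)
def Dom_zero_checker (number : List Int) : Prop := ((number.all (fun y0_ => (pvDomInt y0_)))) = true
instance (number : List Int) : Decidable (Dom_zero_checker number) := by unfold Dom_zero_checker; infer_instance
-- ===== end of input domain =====

-- B replaces A's break/early-return index scan and slice by a direct structural recursion peeling one leading zero at a time (simpler decomposition, same cost).

-- ===== PORT A =====
-- A's inner `for i in range(len(number))` loop: break => return number[i:] (start := i),
-- `i >= len(number)-1` => return [0]; the loop never falls through (entered only when number ≠ []).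
def zcLoopA (number : List Int) (i : Nat) : List Int :=
  if _h : i < number.length then
    if number.getD i 0 ≠ 0 then number.drop i          -- start = i; break; return number[start:]
    else if number.length - 1 ≤ i then [0]
    else zcLoopA number (i + 1)
  else number                                          -- loop exhausted: start stays 0 (unreachable in A)
termination_by number.length - i

def zero_checker (number : List Int) : List Int :=
  if number = [] then number
  else if number.getD 0 0 = 0 then zcLoopA number 0
  else number.drop 0                                   -- start = 0; return number[start:]

-- ===== PORT B =====
def zero_checker_alt (number : List Int) : List Int :=
  match number with
  | [] => []
  | d :: rest =>
    if d ≠ 0 then d :: rest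
    else if rest = [] then [0]
    else zero_checker_alt rest

-- ===== PRECONDITION & SPEC =====
def Spec_zero_checker (number : List Int) (out : List Int) : Prop := out = zero_checker_alt number
instance (number : List Int) (out : List Int) : Decidable (Spec_zero_checker number out) := by unfold Spec_zero_checker; infer_instance

-- ===== CLAIM (what is proved, stated in full; the proofs are below) =====
def Claim_equal_zero_checker : Prop := ∀ (number : List Int), Dom_zero_checker number → Spec_zero_checker number (zero_checker number)

-- ===== LEMMAS AND PROOFS =====

lemma alt_cons (d : Int) (rest : List Int) :
    zero_checker_alt (d :: rest) =
      if d ≠ 0 then d :: rest else if rest = [] then [0] else zero_checker_alt rest := by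
  rfl

lemma zcLoopA_eq (number : List Int) : ∀ (k i : Nat), k = number.length - i →
    i < number.length → zcLoopA number i = zero_checker_alt (number.drop i) := by
  intro k
  induction k with
  | zero => intro i hk hi; omega
  | succ k ih =>
    intro i hk hi
    have hdrop : number.drop i = number.getD i 0 :: number.drop (i + 1) := by
      rw [List.drop_eq_getElem_cons hi]
      congr 1
      simp [List.getD_eq_getElem?_getD, List.getElem?_eq_getElem hi]
    unfold zcLoopA
    rw [dif_pos hi, hdrop, alt_cons]
    by_cases hv : number.getD i 0 ≠ 0
    · rw [if_pos hv, if_pos hv]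
    · rw [if_neg hv, if_neg hv]
      by_cases hlast : number.length - 1 ≤ i
      · have hnil : number.drop (i + 1) = [] := List.drop_eq_nil_of_le (by omega)
        rw [if_pos hlast, if_pos hnil]
      · have hi1 : i + 1 < number.length := by omega
        have hne : number.drop (i + 1) ≠ [] := by
          simp only [ne_eq, List.drop_eq_nil_iff]; omega
        rw [if_neg hlast, if_neg hne]
        exact ih (i + 1) (by omega) hi1

-- ===== VERDICT (by name: the statement is the Claim_ definition above) =====
theorem zero_checker_spec : Claim_equal_zero_checker := by
  intro number _
  unfold Spec_zero_checker zero_checker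
  match number with
  | [] => rfl
  | d :: rest =>
    rw [if_neg (by simp : ¬(d :: rest : List Int) = [])]
    by_cases hd : d = 0
    · rw [if_pos (by simp [hd])]
      have := zcLoopA_eq (d :: rest) ((d :: rest).length - 0) 0 rfl (by simp)
      simpa using this
    · rw [if_neg (by simp [hd]), List.drop_zero, alt_cons, if_pos hd]
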